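-- pv_equiv track=rewrite | github.com/mamroax/Python_lab | lab_1/versions_1-15.py | version_11
-- ===== SOURCE A (Python) =====
-- def version_11(list1: list[int]) -> bool:
--     """Написать функцию, которая принимает целочисленный список,
--      состоящий из n элементов, и возвращает True, если
--     в каком-то месте списка по порядку содержатся элементы 1,2,3
--     или комбинации их перестановок."""
--     string1 = ''
--     for i in list1:
--         string1 += str(i)
--     if '123' in string1:
--         return True
--     if '132' in string1:
--         return True
--     if '213' in string1:
--         return True
--     if '231' in string1:
--         return True
--     if '321' in string1:
--         return True
--     if '312' in string1:
--         return True
--     return False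
-- ===== SOURCE B (Python) =====
-- def version_11(list1: list[int]) -> bool:
--     string1 = ''.join(str(i) for i in list1)
--     for i in range(len(string1) - 2):
--         if sorted(string1[i:i + 3]) == ['1', '2', '3']:
--             return True
--     return False
-- ===== Notes on version B (the rewrite author's own statement) =====
-- stated objective: simpler
-- what changed: Replaces the six explicit permutation substring checks by a single sliding-window pass that tests whether the sorted 3-char window equals ['1','2','3'].
import Mathlib
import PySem

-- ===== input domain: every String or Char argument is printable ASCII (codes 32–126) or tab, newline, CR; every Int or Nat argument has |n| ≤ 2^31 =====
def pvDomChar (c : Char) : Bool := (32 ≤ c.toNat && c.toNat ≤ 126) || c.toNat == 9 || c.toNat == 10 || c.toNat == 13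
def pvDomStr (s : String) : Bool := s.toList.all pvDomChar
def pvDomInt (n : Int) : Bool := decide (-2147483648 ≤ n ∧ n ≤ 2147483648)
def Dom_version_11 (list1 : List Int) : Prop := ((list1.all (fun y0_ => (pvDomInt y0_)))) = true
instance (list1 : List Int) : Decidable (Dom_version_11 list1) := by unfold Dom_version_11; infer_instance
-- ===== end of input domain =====

-- B replaces A's six explicit permutation substring checks by one sliding-window scan
-- testing sorted(window) == ['1','2','3']; objective: simpler.

-- ===== PORT A =====
def version_11 (list1 : List Int) : Bool :=
  -- string1 = ''; for i in list1: string1 += str(i)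
  let string1 : List Char := list1.foldl (fun acc i => acc ++ (PySem.Int.toStr i).toList) []
  if PySem.Chars.isIn ['1','2','3'] string1 then true
  else if PySem.Chars.isIn ['1','3','2'] string1 then true
  else if PySem.Chars.isIn ['2','1','3'] string1 then true
  else if PySem.Chars.isIn ['2','3','1'] string1 then true
  else if PySem.Chars.isIn ['3','2','1'] string1 then true
  else if PySem.Chars.isIn ['3','1','2'] string1 then true
  else false

-- ===== PORT B =====
def version_11_alt (list1 : List Int) : Bool :=
  -- string1 = ''.join(str(i) for i in list1)
  let string1 : List Char := list1.flatMap (fun i => (PySem.Int.toStr i).toList)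
  -- for i in range(len(string1) - 2): if sorted(string1[i:i+3]) == ['1','2','3']: return True
  (PySem.List.pyRange 0 ((string1.length : Int) - 2) 1).any (fun i =>
    PySem.List.sorted (PySem.List.slice string1 (some i) (some (i + 3))) (fun x => x) false
      == ['1','2','3'])

-- ===== PRECONDITION & SPEC =====
def Spec_version_11 (list1 : List Int) (out : Bool) : Prop := out = version_11_alt list1
instance (list1 : List Int) (out : Bool) : Decidable (Spec_version_11 list1 out) := by unfold Spec_version_11; infer_instance

-- ===== CLAIM (what is proved, stated in full; the proofs are below) =====
def Claim_equal_version_11 : Prop := ∀ (list1 : List Int), Dom_version_11 list1 → Spec_version_11 list1 (version_11 list1)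

-- ===== LEMMAS AND PROOFS =====

-- a list permuting ['1','2','3'] is one of the six permutations
theorem pv_perm3 (w : List Char) (h : w.Perm ['1','2','3']) :
    w = ['1','2','3'] ∨ w = ['1','3','2'] ∨ w = ['2','1','3'] ∨
    w = ['2','3','1'] ∨ w = ['3','2','1'] ∨ w = ['3','1','2'] := by
  have hl : w.length = 3 := h.length_eq
  match w, hl with
  | [a,b,c], _ =>
    rw [List.cons_perm_iff_perm_erase] at h
    obtain ⟨ha, h⟩ := h
    fin_cases ha <;> simp only [List.erase_cons_head, show (['1','2','3'] : List Char).erase '2' = ['1','3'] from by decide, show (['1','2','3'] : List Char).erase '3' = ['1','2'] from by decide] at h <;>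
      · rw [List.cons_perm_iff_perm_erase] at h
        obtain ⟨hb, h⟩ := h
        fin_cases hb <;> simp_all [List.perm_singleton, List.erase_cons_head]

-- window i of cs (as port B's slice computes it)
theorem pv_window (cs : List Char) (j : Nat) :
    PySem.List.slice cs (some (j : Int)) (some ((j : Int) + 3)) = (cs.drop j).take 3 := by
  have := PySem.List.slice_natCast_add (xs := cs) (j := j) (n := 3)
  simpa using this

theorem pv_key (cs : List Char) :
    ((PySem.Chars.isIn ['1','2','3'] cs || PySem.Chars.isIn ['1','3','2'] cs ||
      PySem.Chars.isIn ['2','1','3'] cs || PySem.Chars.isIn ['2','3','1'] cs ||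
      PySem.Chars.isIn ['3','2','1'] cs || PySem.Chars.isIn ['3','1','2'] cs) = true) ↔
    ((PySem.List.pyRange 0 ((cs.length : Int) - 2) 1).any (fun i =>
      PySem.List.sorted (PySem.List.slice cs (some i) (some (i + 3))) (fun x => x) false
        == ['1','2','3']) = true) := by
  constructor
  · intro h
    -- some permutation p is a substring of cs
    have : ∃ p : List Char, p.Perm ['1','2','3'] ∧ PySem.Chars.isIn p cs = true := by
      simp only [Bool.or_eq_true] at h
      rcases h with ((((h|h)|h)|h)|h)|h
      · exact ⟨_, by decide, h⟩
      · exact ⟨_, by decide, h⟩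
      · exact ⟨_, by decide, h⟩
      · exact ⟨_, by decide, h⟩
      · exact ⟨_, by decide, h⟩
      · exact ⟨_, by decide, h⟩
    obtain ⟨p, hperm, hin⟩ := this
    obtain ⟨j, hpre⟩ := (PySem.Chars.exists_prefix_drop_iff_isIn p cs).mpr hin
    have hp3 : p.length = 3 := hperm.length_eq
    have hjlen : j + 3 ≤ cs.length := by
      have := hpre.length_le
      simp [hp3] at this
      omega
    rw [List.any_eq_true]
    refine ⟨(j : Int), ?_, ?_⟩
    · rw [PySem.List.mem_pyRange_one]
      constructor
      · exact_mod_cast Nat.zero_le j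
      · omega
    · rw [pv_window]
      have hw : (cs.drop j).take 3 = p := by
        rw [List.prefix_iff_eq_take.mp hpre, hp3]
      rw [hw, beq_iff_eq]
      rw [show (['1','2','3'] : List Char) = PySem.List.sorted ['1','2','3'] (fun x => x) false from by decide]
      exact (PySem.List.sorted_id_eq_sorted_id_iff_perm _ _).mpr hperm
  · intro h
    rw [List.any_eq_true] at h
    obtain ⟨i, hmem, hi⟩ := h
    rw [PySem.List.mem_pyRange_one] at hmem
    obtain ⟨hi0, hilt⟩ := hmem
    set j := i.toNat with hj
    have hicast : i = (j : Int) := by omega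
    rw [hicast, pv_window, beq_iff_eq] at hi
    have hperm : ((cs.drop j).take 3).Perm ['1','2','3'] := by
      rw [show (['1','2','3'] : List Char) = PySem.List.sorted ['1','2','3'] (fun x => x) false from by decide] at hi
      exact (PySem.List.sorted_id_eq_sorted_id_iff_perm _ _).mp hi
    have hpre : ((cs.drop j).take 3) <+: cs.drop j := List.take_prefix _ _
    have hin : PySem.Chars.isIn ((cs.drop j).take 3) cs = true :=
      (PySem.Chars.exists_prefix_drop_iff_isIn _ cs).mp ⟨j, hpre⟩
    rcases pv_perm3 _ hperm with hw|hw|hw|hw|hw|hw <;>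
      rw [hw] at hin <;> simp [hin]

-- six-deep early-return if-chain is a disjunction
theorem pv_ifchain (c1 c2 c3 c4 c5 c6 : Bool) :
    (if c1 then true else if c2 then true else if c3 then true
     else if c4 then true else if c5 then true else if c6 then true else false)
      = (c1 || c2 || c3 || c4 || c5 || c6) := by
  cases c1 <;> cases c2 <;> cases c3 <;> cases c4 <;> cases c5 <;> cases c6 <;> simp

-- ===== VERDICT (by name: the statement is the Claim_ definition above) =====
theorem version_11_spec : Claim_equal_version_11 := by
  intro list1 _
  unfold Spec_version_11 version_11 version_11_alt
  rw [show (list1.foldl (fun acc i => acc ++ (PySem.Int.toStr i).toList) []) =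
        list1.flatMap (fun i => (PySem.Int.toStr i).toList) from by
      simpa using PySem.List.foldl_append_eq_flatMap (l := list1)
        (g := fun i => (PySem.Int.toStr i).toList) (acc := [])]
  set cs := list1.flatMap (fun i => (PySem.Int.toStr i).toList) with hcs
  rw [pv_ifchain]
  have hkey := pv_key cs
  cases h1 : (PySem.Chars.isIn ['1','2','3'] cs || PySem.Chars.isIn ['1','3','2'] cs ||
      PySem.Chars.isIn ['2','1','3'] cs || PySem.Chars.isIn ['2','3','1'] cs ||
      PySem.Chars.isIn ['3','2','1'] cs || PySem.Chars.isIn ['3','1','2'] cs) <;>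
    cases h2 : ((PySem.List.pyRange 0 ((cs.length : Int) - 2) 1).any (fun i =>
      PySem.List.sorted (PySem.List.slice cs (some i) (some (i + 3))) (fun x => x) false
        == ['1','2','3'])) <;> simp_all
  obtain ⟨x, ⟨hx0, hx1⟩, hx2⟩ := h1
  exact h2 x hx0 hx1 hx2
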